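-- pv_equiv track=rewrite | github.com/SufficientDaikon/archon | servers/agent-router/indexer.py | _derive_category
-- ===== SOURCE A (Python) =====
-- def _derive_category(filename: str) -> str:
--     """Derive category from agent filename prefix."""
--     prefixes = {
--         "engineering-": "engineering",
--         "design-": "design",
--         "testing-": "testing",
--         "game-": "game",
--         "godot-": "game",
--         "agents-": "orchestration",
--     }
--     for prefix, cat in prefixes.items():
--         if filename.startswith(prefix):
--             return cat
--     return "niche"
-- ===== SOURCE B (Python) =====
-- _PREFIX_TO_CATEGORY = {
--     "engineering-": "engineering",
--     "design-": "design",
--     "testing-": "testing",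
--     "game-": "game",
--     "godot-": "game",
--     "agents-": "orchestration",
-- }
--
--
-- def _derive_category(filename: str) -> str:
--     """Derive category from agent filename prefix."""
--     idx = filename.find("-")
--     if idx == -1:
--         return "niche"
--     return _PREFIX_TO_CATEGORY.get(filename[: idx + 1], "niche")
-- ===== Notes on version B (the rewrite author's own statement) =====
-- stated objective: simpler
-- what changed: Replaces the loop over the prefix dict with startswith tests by a single find('-') to locate the first dash, slicing the dash-terminated prefix and doing one dict lookup with a 'niche' default.
import Mathlib
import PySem

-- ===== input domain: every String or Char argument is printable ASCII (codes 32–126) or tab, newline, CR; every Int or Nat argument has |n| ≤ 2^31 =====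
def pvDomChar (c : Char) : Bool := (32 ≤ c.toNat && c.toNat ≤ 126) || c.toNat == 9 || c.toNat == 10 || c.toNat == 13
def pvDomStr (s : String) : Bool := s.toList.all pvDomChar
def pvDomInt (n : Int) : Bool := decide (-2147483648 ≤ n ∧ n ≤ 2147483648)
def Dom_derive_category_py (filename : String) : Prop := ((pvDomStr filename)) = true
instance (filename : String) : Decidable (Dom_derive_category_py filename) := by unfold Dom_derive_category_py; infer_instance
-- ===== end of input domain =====

-- B replaces A's loop of startswith tests by one find('-') + slice + single dict lookup (simpler control flow, same results).

-- ===== PORT A =====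
-- the literal `prefixes` dict of A, as the (prefix, category) pairs it iterates over
def pvPrefixPairs : List (String × String) :=
  [("engineering-", "engineering"), ("design-", "design"), ("testing-", "testing"),
   ("game-", "game"), ("godot-", "game"), ("agents-", "orchestration")]

-- A's `for prefix, cat in prefixes.items(): if filename.startswith(prefix): return cat` with final `return "niche"`
def pvALoop (filename : String) : List (String × String) → String
  | [] => "niche"
  | (p, cat) :: rest => if PySem.Str.startswith filename p then cat else pvALoop filename rest

def derive_category_py (filename : String) : String := pvALoop filename pvPrefixPairs

-- ===== PORT B =====
def pvBDict : PySem.Dict String String := PySem.Dict.ofList pvPrefixPairs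

def derive_category_py_alt (filename : String) : String :=
  let idx := PySem.Str.find filename "-"
  if idx == -1 then "niche"
  else PySem.Dict.getD pvBDict (PySem.Str.slice filename none (some (idx + 1))) "niche"

-- ===== PRECONDITION & SPEC =====
def Spec_derive_category_py (filename : String) (out : String) : Prop := out = derive_category_py_alt filename
instance (filename : String) (out : String) : Decidable (Spec_derive_category_py filename out) := by unfold Spec_derive_category_py; infer_instance

-- ===== CLAIM (what is proved, stated in full; the proofs are below) =====
def Claim_equal_derive_category_py : Prop := ∀ (filename : String), Dom_derive_category_py filename → Spec_derive_category_py filename (derive_category_py filename)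

-- ===== LEMMAS AND PROOFS =====

-- If no dash occurs in the string, no dash-terminated prefix is a prefix of it.
theorem pv_no_dash_no_prefix (L q : List Char)
    (h : PySem.Chars.find L ['-'] = -1) : ¬ (q ++ ['-']) <+: L := by
  intro hp
  have hnin : ¬ (['-'] <:+: L) := (PySem.Chars.find_eq_neg_one_iff L ['-']).mp h
  exact hnin ((List.singleton_infix_iff '-' L).mpr (hp.subset (by simp)))

-- When the first dash of L is at index n, a dash-terminated key (with no internal dash)
-- is a prefix of L exactly when it equals L.take (n+1).
theorem pv_startswith_iff_take (L q : List Char) (hq : '-' ∉ q) (n : Nat)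
    (hfind : PySem.Chars.find L ['-'] = (n : Int)) :
    (q ++ ['-']) <+: L ↔ L.take (n + 1) = q ++ ['-'] := by
  constructor
  · intro h
    obtain ⟨t, ht⟩ := h
    have hL : L = q ++ '-' :: t := by simpa using ht.symm
    have h0 : 0 ≤ PySem.Chars.find L ['-'] := by rw [hfind]; exact Int.natCast_nonneg n
    have hspec := PySem.Chars.find_spec (s := L) (sub := ['-']) h0
    have htn : (PySem.Chars.find L ['-']).toNat = n := by rw [hfind]; simp
    rw [htn] at hspec
    -- n ≤ q.length : the dash at q.length rules out a later first dash
    have hle : n ≤ q.length := by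
      by_contra hlt
      push Not at hlt
      exact hspec.2 q.length hlt (by rw [hL]; simp)
    -- q.length ≤ n : a dash strictly before q.length would be inside q
    have hge : q.length ≤ n := by
      by_contra hlt
      push Not at hlt
      obtain ⟨t', ht'⟩ := hspec.1
      have hdrop : L.drop n = q.drop n ++ '-' :: t := by
        rw [hL, List.drop_append_of_le_length (le_of_lt hlt)]
      cases hqd : q.drop n with
      | nil => exact absurd (congrArg List.length hqd) (by simp; omega)
      | cons a u =>
        have heq : '-' :: t' = a :: (u ++ '-' :: t) := by
          have := ht'.trans hdrop
          rw [hqd] at this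
          simpa using this
        have ha : a = '-' := by injection heq with h1 _; exact h1.symm
        have hmem : '-' ∈ q.drop n := by rw [hqd, ← ha]; exact List.mem_cons_self
        exact hq (List.mem_of_mem_drop hmem)
    have hn : n = q.length := le_antisymm hle hge
    subst hn
    rw [hL]
    simp [List.take_append]
  · intro h
    exact h ▸ List.take_prefix (n + 1) L

-- String equality with a literal, through toList.
theorem pv_ofList_eq_iff (t : List Char) (u : String) :
    (String.ofList t = u) ↔ t = u.toList := by
  constructor
  · intro h; have := congrArg String.toList h; simpa using this
  · intro h; subst h; simp

theorem pv_main (s : String) : derive_category_py s = derive_category_py_alt s := by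
  have hbridge : ("-" : String).toList = ['-'] := rfl
  rcases le_iff_lt_or_eq.mp (PySem.Chars.neg_one_le_find s.toList ['-']) with hpos | hneg
  · -- a dash exists: find = (n : Int) with n its index
    have h0 : 0 ≤ PySem.Chars.find s.toList ['-'] := by omega
    obtain ⟨n, hn⟩ := Int.eq_ofNat_of_zero_le h0
    -- B's sliced key
    have hslice : (PySem.Str.slice s none (some (PySem.Str.find s "-" + 1))) =
        String.ofList (s.toList.take (n + 1)) := by
      apply String.toList_injective
      simp [PySem.Str.find, hbridge, hn, PySem.List.slice_to (xs := s.toList) (b := (n : Int) + 1) (by omega)]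
    have hne : (PySem.Str.find s "-" == (-1 : Int)) = false := by
      simp [PySem.Str.find, hbridge, hn]
    -- rewrite each startswith test of A into the equality test B performs
    have hsw : ∀ (q : List Char) (p : String), '-' ∉ q → p.toList = q ++ ['-'] →
        PySem.Str.startswith s p = (String.ofList (s.toList.take (n + 1)) == p) := by
      intro q p hq hp
      have h1 : PySem.Str.startswith s p = true ↔ (q ++ ['-']) <+: s.toList := by
        rw [PySem.Str.startswith_eq, PySem.Chars.startswith_iff, hp]
      have h2 : (String.ofList (s.toList.take (n + 1)) == p) = true ↔
          s.toList.take (n + 1) = q ++ ['-'] := by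
        simp only [beq_iff_eq]
        rw [pv_ofList_eq_iff, hp]
      rw [← Bool.coe_iff_coe, h1, h2]
      exact pv_startswith_iff_take s.toList q hq n hn
    simp only [derive_category_py, derive_category_py_alt, pvALoop, pvPrefixPairs, hne,
      Bool.false_eq_true, if_false, hslice]
    rw [hsw ("engineering".toList) _ (by decide) rfl,
        hsw ("design".toList) _ (by decide) rfl,
        hsw ("testing".toList) _ (by decide) rfl,
        hsw ("game".toList) _ (by decide) rfl,
        hsw ("godot".toList) _ (by decide) rfl,
        hsw ("agents".toList) _ (by decide) rfl]
    -- unfold the literal dict lookup into the same chain of equality tests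
    have hB : pvBDict = PySem.Dict.mk pvPrefixPairs := by decide
    rw [hB, PySem.Dict.getD_eq_get?_getD]
    simp only [pvPrefixPairs, PySem.Dict.get?_mk_cons]
    have hnone : (PySem.Dict.mk ([] : List (String × String))).get?
        (String.ofList (s.toList.take (n + 1))) = none := rfl
    simp [BEq.comm, apply_ite (fun o => Option.getD o "niche"), hnone]
  · -- no dash: every startswith is false and B takes its "niche" branch
    have hA : ∀ p : String, (∃ q, p.toList = q ++ ['-']) → PySem.Str.startswith s p = false := by
      rintro p ⟨q, hp⟩
      rw [PySem.Str.startswith_eq]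
      cases hb : PySem.Chars.startswith s.toList p.toList
      · rfl
      · exact absurd (hp ▸ (PySem.Chars.startswith_iff s.toList p.toList).mp hb)
          (pv_no_dash_no_prefix s.toList q hneg.symm)
    simp only [derive_category_py, derive_category_py_alt, pvALoop, pvPrefixPairs]
    rw [hA _ ⟨"engineering".toList, rfl⟩, hA _ ⟨"design".toList, rfl⟩,
        hA _ ⟨"testing".toList, rfl⟩, hA _ ⟨"game".toList, rfl⟩,
        hA _ ⟨"godot".toList, rfl⟩, hA _ ⟨"agents".toList, rfl⟩]
    simp [PySem.Str.find, hbridge, ← hneg]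

-- ===== VERDICT (by name: the statement is the Claim_ definition above) =====
theorem derive_category_py_spec : Claim_equal_derive_category_py := by
  intro s _
  unfold Spec_derive_category_py
  exact pv_main s
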